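-- pv_equiv track=rewrite | github.com/emaric/advent-of-code | 2024/shared/util.py | extend_list
-- ===== SOURCE A (Python) =====
-- def extend_list(input_list: list, index: int, fill=0):
--     """Returns list extended for index specified to exist, filled with specified char
--
--     index:
--         index that input_list will be extended to
--     fill:
--         default value for newly created indexes in list
--     """
--     temp_list = input_list
--     while True:
--         try:
--             # try to access list index
--             temp = temp_list[index]  # noqa: F821, F841
--             break
--         except IndexError:
--             # if list not lot enough
--             temp_list.append(fill)  # noqa: F821
--         # is this needed?
--         """
--         except TypeError:
--
--             temp_list.append(input_list)
--             return extend_list(temp_list, index, fill)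
--         """
--     return temp_list
-- ===== SOURCE B (Python) =====
-- def extend_list(input_list: list, index: int, fill=0):
--     """Returns list extended for index specified to exist, filled with fill.
--
--     Same in-place mutation and return of the same list object as A,
--     but the needed length is computed in closed form and added with one extend.
--     """
--     try:
--         input_list[index]
--     except IndexError:
--         need = index + 1 if index >= 0 else -index
--         input_list.extend([fill] * (need - len(input_list)))
--     return input_list
-- ===== Notes on version B (the rewrite author's own statement) =====
-- stated objective: simpler
-- what changed: Replaces the one-append-per-IndexError retry loop with a single closed-form length computation and one bulk extend.
import Mathlib
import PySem

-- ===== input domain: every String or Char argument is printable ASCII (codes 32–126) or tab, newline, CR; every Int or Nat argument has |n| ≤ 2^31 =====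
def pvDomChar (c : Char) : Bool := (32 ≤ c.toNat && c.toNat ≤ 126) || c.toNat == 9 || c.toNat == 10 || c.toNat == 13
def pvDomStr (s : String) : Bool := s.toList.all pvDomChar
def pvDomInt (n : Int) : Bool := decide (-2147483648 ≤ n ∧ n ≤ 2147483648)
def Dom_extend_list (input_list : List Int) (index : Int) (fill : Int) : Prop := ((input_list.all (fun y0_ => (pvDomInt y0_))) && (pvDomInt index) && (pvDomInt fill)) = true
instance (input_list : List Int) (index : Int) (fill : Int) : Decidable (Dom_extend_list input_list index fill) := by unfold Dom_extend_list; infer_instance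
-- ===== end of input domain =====

-- B replaces A's one-append-per-IndexError retry loop by a closed-form needed
-- length and a single bulk extend; both mutate the Python list in place, the
-- return-value equivalence is what is proved here.

-- needed final length so that input_list[index] exists (shared arithmetic helper)
def needLen (index : Int) : Int := if 0 ≤ index then index + 1 else -index

-- ===== PORT A =====
-- while True: try temp_list[index]; break; except IndexError: temp_list.append(fill)
def extend_list (input_list : List Int) (index : Int) (fill : Int) : List Int :=
  if h : (PySem.List.pyGet? input_list index).isSome then
    input_list
  else
    extend_list (input_list ++ [fill]) index fill
termination_by (needLen index - input_list.length).toNat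
decreasing_by
  rw [Option.not_isSome_iff_eq_none, PySem.List.pyGet?_eq_none_iff,
      PySem.Raise.InRange] at h
  simp only [needLen, List.length_append, List.length_cons, List.length_nil]
  split <;> omega

-- ===== PORT B =====
-- try input_list[index] ; on IndexError extend with [fill] * (need - len(input_list))
def extend_list_alt (input_list : List Int) (index : Int) (fill : Int) : List Int :=
  match PySem.List.pyGet? input_list index with
  | some _ => input_list
  | none =>
      input_list ++ List.replicate ((needLen index - input_list.length).toNat) fill

-- ===== PRECONDITION & SPEC =====
def Spec_extend_list (input_list : List Int) (index : Int) (fill : Int) (out : List Int) : Prop := out = extend_list_alt input_list index fill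
instance (input_list : List Int) (index : Int) (fill : Int) (out : List Int) : Decidable (Spec_extend_list input_list index fill out) := by unfold Spec_extend_list; infer_instance

-- ===== CLAIM (what is proved, stated in full; the proofs are below) =====
def Claim_equal_extend_list : Prop := ∀ (input_list : List Int) (index : Int) (fill : Int), Dom_extend_list input_list index fill → Spec_extend_list input_list index fill (extend_list input_list index fill)

-- ===== LEMMAS AND PROOFS =====

-- one appended fill absorbs into the bulk replicate of B (or finishes it)
theorem alt_append_fill (l : List Int) (i f : Int)
    (h : PySem.List.pyGet? l i = none) :
    extend_list_alt (l ++ [f]) i f = extend_list_alt l i f := by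
  have h' := h
  rw [PySem.List.pyGet?_eq_none_iff, PySem.Raise.InRange] at h'
  unfold extend_list_alt
  simp only [h]
  cases h2 : PySem.List.pyGet? (l ++ [f]) i with
  | some x =>
    have h3 : PySem.Raise.InRange (l ++ [f]).length i := by
      by_contra hc
      rw [← PySem.List.pyGet?_eq_none_iff] at hc
      simp [hc] at h2
    rw [PySem.Raise.InRange] at h3
    obtain ⟨h3a, h3b⟩ := h3
    simp only [List.length_append, List.length_cons, List.length_nil] at h3a h3b
    have hn : ((needLen i - (l.length : Int)).toNat) = 1 := by
      simp only [needLen]; split <;> omega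
    rw [hn]
    simp
  | none =>
    rw [PySem.List.pyGet?_eq_none_iff, PySem.Raise.InRange] at h2
    simp only [List.length_append, List.length_cons, List.length_nil] at h2
    have hn : (needLen i - (l.length : Int)).toNat
        = ((needLen i - ((l ++ [f]).length : Int)).toNat) + 1 := by
      simp only [needLen, List.length_append, List.length_cons, List.length_nil]
      split <;> omega
    rw [hn, List.replicate_succ, List.append_assoc]
    rfl

theorem extend_eq_alt (l : List Int) (i f : Int) :
    extend_list l i f = extend_list_alt l i f := by
  induction l using extend_list.induct i f with
  | case1 l h =>
    rw [Option.isSome_iff_exists] at h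
    obtain ⟨x, hx⟩ := h
    rw [extend_list, extend_list_alt]
    simp [hx]
  | case2 l h ih =>
    rw [Option.not_isSome_iff_eq_none] at h
    rw [extend_list]
    simp only [h, Option.isSome_none, Bool.false_eq_true, dite_false]
    rw [ih, alt_append_fill l i f h]

-- ===== VERDICT (by name: the statement is the Claim_ definition above) =====
theorem extend_list_spec : Claim_equal_extend_list := by
  intro l i f _
  exact extend_eq_alt l i f
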